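-- pv_equiv track=rewrite | github.com/MikeD89/AdventOfPython | 2024/2024_day_05.py | parse
-- ===== SOURCE A (Python) =====
-- def parse(input):
--     first = []
--     second = []
--     firstt = True
--     for line in input.splitlines():
--         if line == "":
--             firstt = False
--             continue
--
--         if firstt:
--             first.append(line.split("|"))
--         else:
--             second.append(line.split(","))
--     return first,second
-- ===== SOURCE B (Python) =====
-- def parse(input):
--     lines = input.splitlines()
--     i = lines.index("") if "" in lines else len(lines)
--     first = [l.split("|") for l in lines[:i]]
--     second = [l.split(",") for l in lines[i + 1:] if l != ""]
--     return first, second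
-- ===== Notes on version B (the rewrite author's own statement) =====
-- stated objective: simpler
-- what changed: Replaces the stateful firstt-flag loop by an explicit partition at the first blank line followed by two independent list comprehensions.
import Mathlib
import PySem

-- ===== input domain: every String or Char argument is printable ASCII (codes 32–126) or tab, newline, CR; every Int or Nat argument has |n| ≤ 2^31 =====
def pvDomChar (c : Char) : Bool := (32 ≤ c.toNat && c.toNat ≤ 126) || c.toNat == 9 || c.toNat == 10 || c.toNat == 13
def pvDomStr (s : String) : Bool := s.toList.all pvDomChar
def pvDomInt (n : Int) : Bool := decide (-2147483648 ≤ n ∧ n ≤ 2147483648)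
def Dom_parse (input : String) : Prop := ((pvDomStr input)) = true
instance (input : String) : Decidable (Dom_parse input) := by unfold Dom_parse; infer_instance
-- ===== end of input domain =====

-- B replaces A's stateful firstt-flag loop by a partition at the first blank line plus two maps (objective: simpler).


-- ===== PORT A =====
-- loop body: state = ((first, second), firstt)
def parseStep (st : (List (List String) × List (List String)) × Bool) (line : String) :
    (List (List String) × List (List String)) × Bool :=
  if line = "" then (st.1, false)
  else if st.2 then ((st.1.1 ++ [(PySem.Str.split? line "|").getD []], st.1.2), st.2)
  else ((st.1.1, st.1.2 ++ [(PySem.Str.split? line ",").getD []]), st.2)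

def parse (input : String) : List (List String) × List (List String) :=
  ((PySem.Str.splitlines input).foldl parseStep (([], []), true)).1

-- ===== PORT B =====
-- lines[:i] and lines[i+1:] with the natural index i are take/drop (PySem.List.slice_to_natCast / slice_from_natCast)
def parse_alt (input : String) : List (List String) × List (List String) :=
  let lines := PySem.Str.splitlines input
  let i := (PySem.List.index? lines "").getD lines.length
  ((lines.take i).map (fun l => (PySem.Str.split? l "|").getD []),
   ((lines.drop (i + 1)).filter (fun l => l ≠ "")).map (fun l => (PySem.Str.split? l ",").getD []))

-- ===== PRECONDITION & SPEC =====
def Spec_parse (input : String) (out : List (List String) × List (List String)) : Prop := out = parse_alt input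
instance (input : String) (out : List (List String) × List (List String)) : Decidable (Spec_parse input out) := by unfold Spec_parse; infer_instance

-- ===== CLAIM (what is proved, stated in full; the proofs are below) =====
def Claim_equal_parse : Prop := ∀ (input : String), Dom_parse input → Spec_parse input (parse input)

-- ===== LEMMAS AND PROOFS =====

theorem foldl_parseStep_false (lines : List String) (f s : List (List String)) :
    lines.foldl parseStep ((f, s), false)
      = ((f, s ++ (lines.filter (fun l => l ≠ "")).map (fun l => (PySem.Str.split? l ",").getD [])), false) := by
  induction lines generalizing s with
  | nil => simp
  | cons x xs ih =>
    by_cases hx : x = "" <;> simp [parseStep, hx, ih]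

theorem foldl_parseStep_true (lines : List String) (f s : List (List String)) :
    lines.foldl parseStep ((f, s), true)
      = (let i := (PySem.List.index? lines "").getD lines.length;
         ((f ++ (lines.take i).map (fun l => (PySem.Str.split? l "|").getD []),
           s ++ ((lines.drop (i + 1)).filter (fun l => l ≠ "")).map (fun l => (PySem.Str.split? l ",").getD [])),
          (PySem.List.index? lines "").isNone)) := by
  induction lines generalizing f with
  | nil => simp [PySem.List.index?]
  | cons x xs ih =>
    by_cases hx : x = ""
    · subst hx
      rw [List.foldl_cons]
      have hstep : parseStep ((f, s), true) "" = ((f, s), false) := by simp [parseStep]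
      rw [hstep, foldl_parseStep_false]
      have hi := PySem.List.index?_cons_self "" xs
      simp only [hi]
      simp
    · rw [List.foldl_cons]
      have hstep : parseStep ((f, s), true) x
          = ((f ++ [(PySem.Str.split? x "|").getD []], s), true) := by
        simp [parseStep, hx]
      rw [hstep, ih]
      have hi := PySem.List.index?_cons_of_ne (x := x) (v := "") xs hx
      simp only [hi]
      cases h : PySem.List.index? xs "" with
      | none => simp
      | some k => simp [List.take_succ_cons]

theorem parse_spec : Claim_equal_parse := by
  intro input _
  unfold Spec_parse parse parse_alt
  rw [foldl_parseStep_true]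
  simp
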